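-- pv_equiv track=rewrite | github.com/patconnole/bricks | matrix/main7.py | get_permutation_count
-- ===== SOURCE A (Python) =====
-- from math import factorial
--
-- def get_permutation_count(brick_combos):
--     answer = 0
--     for combo in brick_combos:
--         count_map = {}
--         for value in combo:
--             if value in count_map.keys():
--                 count_map[value] +=1
--             else:
--                 count_map[value] = 1
--         denom = 1
--         for key in count_map.keys():
--             denom *= factorial(count_map[key])
--         answer += factorial(len(combo)) // denom
--     return answer
-- ===== SOURCE B (Python) =====
-- from math import comb
--
--
-- def get_permutation_count(brick_combos):
--     answer = 0
--     for combo in brick_combos: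
--         t, r = 0, 1
--         for v in dict.fromkeys(combo):
--             c = combo.count(v)
--             r *= comb(t + c, c)
--             t += c
--         answer += r
--     return answer
-- ===== Notes on version B (the rewrite author's own statement) =====
-- stated objective: alternative
-- what changed: Replaces the incremental count dict plus factorial(n)//product-of-factorials with an ordered-dedup scan that accumulates each combo's multinomial as a running product of binomial coefficients comb(t+c, c), never forming factorial(len(combo)) or a denominator, and with no division at all.
import Mathlib
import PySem

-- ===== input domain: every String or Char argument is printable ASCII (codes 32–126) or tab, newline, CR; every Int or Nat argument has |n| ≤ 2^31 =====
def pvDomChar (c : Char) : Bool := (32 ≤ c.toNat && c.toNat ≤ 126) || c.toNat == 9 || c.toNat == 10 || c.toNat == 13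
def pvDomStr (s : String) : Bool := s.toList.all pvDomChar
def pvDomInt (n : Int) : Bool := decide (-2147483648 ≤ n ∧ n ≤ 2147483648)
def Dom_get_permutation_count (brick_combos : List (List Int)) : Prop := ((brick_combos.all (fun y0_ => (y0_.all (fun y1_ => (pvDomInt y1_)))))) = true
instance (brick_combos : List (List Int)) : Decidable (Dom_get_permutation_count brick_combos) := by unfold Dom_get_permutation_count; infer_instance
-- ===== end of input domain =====

-- B replaces the count dict + factorial(n)//∏factorial(c) with an ordered-dedup scan
-- accumulating a product of binomial coefficients (no factorial of n, no division).

-- ===== PORT A =====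
-- literal port of A; count_map[key] inside the denom loop is ported as getD _ 0,
-- exact because every key iterated over is present in the dict.
def get_permutation_count (brick_combos : List (List Int)) : Int :=
  brick_combos.foldl (fun answer combo =>
    let count_map : PySem.Dict Int Int :=
      combo.foldl (fun d value =>
        if d.contains value then d.insert value (d.getD value 0 + 1)
        else d.insert value 1) PySem.Dict.empty
    let denom : Int :=
      count_map.keys.foldl (fun denom key =>
        denom * ((Nat.factorial (count_map.getD key 0).toNat : Nat) : Int)) 1
    answer + PySem.Int.floordiv ((Nat.factorial combo.length : Nat) : Int) denom) 0

-- ===== PORT B =====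
-- port of Source B; dict.fromkeys(combo) is PySem.List.dedup; t, c, r are the (always
-- nonnegative) loop variables, carried as Nat and cast when added to the answer.
def get_permutation_count_alt (brick_combos : List (List Int)) : Int :=
  brick_combos.foldl (fun answer combo =>
    let st : Nat × Nat :=
      (PySem.List.dedup combo).foldl (fun (st : Nat × Nat) v =>
        let c : Nat := combo.count v
        (st.1 + c, st.2 * Nat.choose (st.1 + c) c)) (0, 1)
    answer + (st.2 : Int)) 0

-- ===== PRECONDITION & SPEC =====
def Spec_get_permutation_count (brick_combos : List (List Int)) (out : Int) : Prop := out = get_permutation_count_alt brick_combos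
instance (brick_combos : List (List Int)) (out : Int) : Decidable (Spec_get_permutation_count brick_combos out) := by unfold Spec_get_permutation_count; infer_instance

-- ===== CLAIM (what is proved, stated in full; the proofs are below) =====
def Claim_equal_get_permutation_count : Prop := ∀ (brick_combos : List (List Int)), Dom_get_permutation_count brick_combos → Spec_get_permutation_count brick_combos (get_permutation_count brick_combos)

-- ===== LEMMAS AND PROOFS =====

-- A's counting loop builds exactly Counter(combo).
theorem pvCountLoop_eq_counter (l : List Int) :
    l.foldl (fun d value =>
        if d.contains value then d.insert value (d.getD value 0 + 1)
        else d.insert value 1) PySem.Dict.empty = PySem.Dict.counter l := by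
  rw [← PySem.Dict.foldl_insert_getD_add_one_eq_counter]
  have hf : (fun (d : PySem.Dict Int Int) value =>
      if d.contains value then d.insert value (d.getD value 0 + 1)
      else d.insert value 1)
      = fun d value => d.insert value (d.getD value 0 + 1) := by
    funext d v
    by_cases h : d.contains v = true
    · simp [h]
    · simp only [Bool.not_eq_true] at h
      have h0 : d.getD v 0 = 0 := PySem.Dict.getD_of_not_contains d 0 h
      simp [h, h0]
  rw [hf]

-- a multiplicative fold from an accumulator is the accumulator times the product
theorem pvFoldl_mul {α : Type} (f : α → Nat) :
    ∀ (ds : List α) (a : Int),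
      ds.foldl (fun acc k => acc * ((f k : Nat) : Int)) a = a * (((ds.map f).prod : Nat) : Int) := by
  intro ds
  induction ds with
  | nil => intro a; simp
  | cons x xs ih =>
      intro a
      simp only [List.foldl_cons, List.map_cons, List.prod_cons, ih]
      push_cast
      ring

-- invariant of B's inner loop: the running product times the factorials so far is
-- the factorial of the running total
theorem pvBinFold (g : Int → Nat) :
    ∀ (ds : List Int) (t r X : Nat), r * X = Nat.factorial t →
      (((ds.foldl (fun (st : Nat × Nat) v =>
          (st.1 + g v, st.2 * Nat.choose (st.1 + g v) (g v))) (t, r))).1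
            = t + (ds.map g).sum)
      ∧ ((ds.foldl (fun (st : Nat × Nat) v =>
          (st.1 + g v, st.2 * Nat.choose (st.1 + g v) (g v))) (t, r)).2
          * (X * ((ds.map g).map Nat.factorial).prod)
            = Nat.factorial (t + (ds.map g).sum)) := by
  intro ds
  induction ds with
  | nil => intro t r X h; simpa using h
  | cons v vs ih =>
      intro t r X h
      have hstep : (r * Nat.choose (t + g v) (g v)) * (X * Nat.factorial (g v))
          = Nat.factorial (t + g v) := by
        have hc := Nat.add_choose_mul_factorial_mul_factorial t (g v)
        calc (r * Nat.choose (t + g v) (g v)) * (X * Nat.factorial (g v))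
            = (t + g v).choose (g v) * Nat.factorial t * Nat.factorial (g v) := by
              rw [← h]; ring
          _ = Nat.factorial (t + g v) := hc
      have hih := ih (t + g v) (r * Nat.choose (t + g v) (g v)) (X * Nat.factorial (g v)) hstep
      simp only [List.foldl_cons, List.map_cons, List.sum_cons, List.prod_cons]
      constructor
      · rw [hih.1]; omega
      · have h2 := hih.2
        rw [show t + (g v + (vs.map g).sum) = t + g v + (vs.map g).sum by omega]
        rw [← h2]; ring

-- the counts over the ordered dedup sum to the length
theorem pvSum_count_dedup (l : List Int) :
    ((PySem.List.dedup l).map l.count).sum = l.length := by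
  have hnd : (PySem.List.dedup l).Nodup := PySem.List.nodup_dedup l
  have hst : (PySem.List.dedup l).toFinset = l.toFinset := by
    ext x
    simp [List.mem_toFinset]
  rw [← List.sum_toFinset _ hnd, hst]
  exact List.sum_toFinset_count_eq_length l

-- the per-combo values agree
theorem pvCombo_eq (combo : List Int) :
    PySem.Int.floordiv ((Nat.factorial combo.length : Nat) : Int)
      ((PySem.Dict.counter combo).keys.foldl (fun denom key =>
        denom * ((Nat.factorial ((PySem.Dict.counter combo).getD key 0).toNat : Nat) : Int)) 1)
    = (((PySem.List.dedup combo).foldl (fun (st : Nat × Nat) v =>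
        (st.1 + combo.count v, st.2 * Nat.choose (st.1 + combo.count v) (combo.count v))) (0, 1)).2 : Int) := by
  have hkeys : (PySem.Dict.counter combo).keys = PySem.List.dedup combo := by
    rw [PySem.Dict.keys_counter, ← PySem.List.dedup_eq_ofList]
  have hdenom : (PySem.Dict.counter combo).keys.foldl (fun denom key =>
      denom * ((Nat.factorial ((PySem.Dict.counter combo).getD key 0).toNat : Nat) : Int)) 1
      = ((((PySem.List.dedup combo).map (fun k => Nat.factorial (combo.count k))).prod : Nat) : Int) := by
    rw [hkeys, pvFoldl_mul (fun k => Nat.factorial (((PySem.Dict.counter combo).getD k 0).toNat)), one_mul]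
    congr 2
    apply List.map_congr_left
    intro k _
    rw [PySem.Dict.getD_counter]
    simp
  have hbin := pvBinFold (fun v => combo.count v) (PySem.List.dedup combo) 0 1 1 (by simp [Nat.factorial])
  have hsum : ((PySem.List.dedup combo).map (fun v => combo.count v)).sum = combo.length :=
    pvSum_count_dedup combo
  have hinv : ((PySem.List.dedup combo).foldl (fun (st : Nat × Nat) v =>
        (st.1 + combo.count v, st.2 * Nat.choose (st.1 + combo.count v) (combo.count v))) (0, 1)).2
      * ((PySem.List.dedup combo).map (fun k => Nat.factorial (combo.count k))).prod
      = Nat.factorial combo.length := by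
    have h2 := hbin.2
    rw [hsum] at h2
    simpa [List.map_map, Function.comp] using h2
  have hPpos : 0 < ((PySem.List.dedup combo).map (fun k => Nat.factorial (combo.count k))).prod := by
    apply List.prod_pos
    intro a ha
    simp only [List.mem_map] at ha
    obtain ⟨k, _, hk⟩ := ha
    rw [← hk]; exact Nat.factorial_pos _
  rw [hdenom, PySem.Int.floordiv_natCast]
  congr 1
  rw [← hinv, Nat.mul_div_cancel _ hPpos]

-- ===== VERDICT (by name: the statement is the Claim_ definition above) =====
theorem get_permutation_count_spec : Claim_equal_get_permutation_count := by
  intro bs _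
  unfold Spec_get_permutation_count get_permutation_count get_permutation_count_alt
  have hfun : (fun (answer : Int) (combo : List Int) =>
      let count_map : PySem.Dict Int Int :=
        combo.foldl (fun d value =>
          if d.contains value then d.insert value (d.getD value 0 + 1)
          else d.insert value 1) PySem.Dict.empty
      let denom : Int :=
        count_map.keys.foldl (fun denom key =>
          denom * ((Nat.factorial (count_map.getD key 0).toNat : Nat) : Int)) 1
      answer + PySem.Int.floordiv ((Nat.factorial combo.length : Nat) : Int) denom)
      = (fun (answer : Int) (combo : List Int) =>
      let st : Nat × Nat :=
        (PySem.List.dedup combo).foldl (fun (st : Nat × Nat) v =>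
          let c : Nat := combo.count v
          (st.1 + c, st.2 * Nat.choose (st.1 + c) c)) (0, 1)
      answer + (st.2 : Int)) := by
    funext answer combo
    simp only
    rw [pvCountLoop_eq_counter]
    rw [pvCombo_eq]
  rw [hfun]
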